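-- pv_equiv track=rewrite | github.com/hlt-cuhksz/CultureSteer | src/result_output/plot_main.py | get_xlabel_colors
-- ===== SOURCE A (Python) =====
-- def get_xlabel_colors(chapter_names):
--     # 为不同索引范围分配颜色
--     colors = []
--     for idx, chapter in enumerate(chapter_names):
--         if 0 <= idx <= 7:
--             colors.append('#990000')  # 深红色
--         elif 8 <= idx <= 13:
--             colors.append('#006400')  # 深绿色
--         else:
--             colors.append('#00008B')  # 深蓝色
--     return colors
-- ===== SOURCE B (Python) =====
-- def get_xlabel_colors(chapter_names):
--     n = len(chapter_names)
--     reds = min(n, 8)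
--     greens = max(0, min(n, 14) - 8)
--     blues = max(0, n - 14)
--     return ['#990000'] * reds + ['#006400'] * greens + ['#00008B'] * blues
-- ===== Notes on version B (the rewrite author's own statement) =====
-- stated objective: simpler
-- what changed: Replaces the enumerate loop with per-index conditionals by computing the three segment lengths in closed form (min/max on len) and concatenating repeated-color lists.
import Mathlib
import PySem

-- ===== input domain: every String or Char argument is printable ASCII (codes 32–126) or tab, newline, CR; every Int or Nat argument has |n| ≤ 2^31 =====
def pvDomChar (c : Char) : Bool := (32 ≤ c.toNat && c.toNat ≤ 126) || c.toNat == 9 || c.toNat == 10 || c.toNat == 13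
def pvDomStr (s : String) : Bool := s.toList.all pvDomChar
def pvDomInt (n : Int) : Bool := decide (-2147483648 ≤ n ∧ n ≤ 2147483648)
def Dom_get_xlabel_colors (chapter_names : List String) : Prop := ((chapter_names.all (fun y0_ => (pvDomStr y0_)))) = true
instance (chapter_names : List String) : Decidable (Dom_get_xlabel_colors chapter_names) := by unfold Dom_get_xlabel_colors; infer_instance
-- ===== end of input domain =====

-- B replaces the per-index conditional loop by closed-form segment lengths; objective: simpler.

-- ===== PORT A =====
def get_xlabel_colors (chapter_names : List String) : List String :=
  (PySem.List.enumerate chapter_names).foldl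
    (fun colors p =>
      if 0 ≤ p.1 ∧ p.1 ≤ 7 then colors ++ ["#990000"]
      else if 8 ≤ p.1 ∧ p.1 ≤ 13 then colors ++ ["#006400"]
      else colors ++ ["#00008B"]) []

-- ===== PORT B =====
def get_xlabel_colors_alt (chapter_names : List String) : List String :=
  let n := chapter_names.length
  List.replicate (min n 8) "#990000"
    ++ List.replicate (max 0 (min n 14 - 8)) "#006400"
    ++ List.replicate (max 0 (n - 14)) "#00008B"

-- ===== PRECONDITION & SPEC =====
def Spec_get_xlabel_colors (chapter_names : List String) (out : List String) : Prop := out = get_xlabel_colors_alt chapter_names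
instance (chapter_names : List String) (out : List String) : Decidable (Spec_get_xlabel_colors chapter_names out) := by unfold Spec_get_xlabel_colors; infer_instance

-- ===== CLAIM (what is proved, stated in full; the proofs are below) =====
def Claim_equal_get_xlabel_colors : Prop := ∀ (chapter_names : List String), Dom_get_xlabel_colors chapter_names → Spec_get_xlabel_colors chapter_names (get_xlabel_colors chapter_names)

-- ===== LEMMAS AND PROOFS =====

-- the color chosen for a (Nat) index
def pvColorOf (i : Nat) : String :=
  if i ≤ 7 then "#990000" else if i ≤ 13 then "#006400" else "#00008B"

-- A's result is the color of each index
theorem get_xlabel_colors_eq_map (xs : List String) :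
    get_xlabel_colors xs = (List.range xs.length).map pvColorOf := by
  unfold get_xlabel_colors
  rw [show (fun (colors : List String) (p : Int × String) =>
      if 0 ≤ p.1 ∧ p.1 ≤ 7 then colors ++ ["#990000"]
      else if 8 ≤ p.1 ∧ p.1 ≤ 13 then colors ++ ["#006400"]
      else colors ++ ["#00008B"]) = (fun colors p => colors ++
        [if 0 ≤ p.1 ∧ p.1 ≤ 7 then "#990000" else if 8 ≤ p.1 ∧ p.1 ≤ 13 then "#006400" else "#00008B"]) from by
    funext colors p; split_ifs <;> rfl,
    PySem.List.foldl_append_singleton_eq_map, List.nil_append]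
  apply List.ext_getElem
  · simp [PySem.List.length_enumerate]
  · intro k h1 h2
    simp only [List.length_map, PySem.List.length_enumerate] at h1
    simp only [List.getElem_map, List.getElem_range,
      PySem.List.getElem_enumerate (h := by simpa [PySem.List.length_enumerate] using h1)]
    unfold pvColorOf
    split_ifs with a b c d <;> first
      | rfl
      | (exfalso; omega)

theorem repl_form (n : Nat) :
    (List.range n).map pvColorOf =
      List.replicate (min n 8) "#990000"
        ++ List.replicate (max 0 (min n 14 - 8)) "#006400"
        ++ List.replicate (max 0 (n - 14)) "#00008B" := by
  induction n with
  | zero => simp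
  | succ n ih =>
    rw [List.range_succ, List.map_append, ih, List.map_singleton]
    by_cases h8 : n < 8
    · have hc : pvColorOf n = "#990000" := by unfold pvColorOf; rw [if_pos (by omega)]
      have : min (n+1) 8 = min n 8 + 1 := by omega
      rw [hc, this, List.replicate_succ' (n := min n 8)]
      have e1 : max 0 (min (n+1) 14 - 8) = max 0 (min n 14 - 8) := by omega
      have e2 : max 0 (n+1 - 14) = max 0 (n - 14) := by omega
      have z1 : min n 14 - 8 = 0 := by omega
      have z2 : n - 14 = 0 := by omega
      rw [e1, e2]; simp [z1, z2]
    · by_cases h14 : n < 14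
      · have hc : pvColorOf n = "#006400" := by
          unfold pvColorOf; rw [if_neg (by omega), if_pos (by omega)]
        have e0 : min (n+1) 8 = min n 8 := by omega
        have e1 : max 0 (min (n+1) 14 - 8) = max 0 (min n 14 - 8) + 1 := by omega
        have e2 : max 0 (n+1 - 14) = max 0 (n - 14) := by omega
        have z2 : n - 14 = 0 := by omega
        rw [hc, e0, e1, e2, List.replicate_succ' (n := max 0 (min n 14 - 8))]
        simp [z2]
      · have hc : pvColorOf n = "#00008B" := by
          unfold pvColorOf; rw [if_neg (by omega), if_neg (by omega)]
        have e0 : min (n+1) 8 = min n 8 := by omega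
        have e1 : max 0 (min (n+1) 14 - 8) = max 0 (min n 14 - 8) := by omega
        have e2 : max 0 (n+1 - 14) = max 0 (n - 14) + 1 := by omega
        rw [hc, e0, e1, e2, List.replicate_succ' (n := max 0 (n - 14))]
        simp

-- ===== VERDICT (by name: the statement is the Claim_ definition above) =====
theorem get_xlabel_colors_spec : Claim_equal_get_xlabel_colors := by
  intro xs _
  unfold Spec_get_xlabel_colors get_xlabel_colors_alt
  rw [get_xlabel_colors_eq_map, repl_form]
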